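-- pv_equiv track=rewrite | github.com/leoantero/UFMG---Algorithms | Project2/main.py | parte_1
-- ===== SOURCE A (Python) =====
-- def parte_1(muros):
--     # Para a parte 1 vou passar pelo vetor e conferir a altura máxima de cada posição olhando para os n/2 vizinhos
--
--     total_muros = len(muros)
--
--     if total_muros == 0:
--         return 0
--
--     # Os vetores esquerda e direita irão armazenar a altura máxima possível indo pela esquerda ou pela direita
--     esquerda = [0] * total_muros
--     direita = [0] * total_muros
--
--     # Os vetores são preenchidos e analisados
--     esquerda[0] = 1
--     for i in range(1, total_muros):
--         esquerda[i] = min(muros[i], esquerda[i - 1] + 1)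
--
--     direita[-1] = 1
--     for i in range(total_muros - 2, -1, -1):
--         direita[i] = min(muros[i], direita[i + 1] + 1)
--
--     # Para cada posição, a altura máxima é o menor daquela posição entre os 2 vetores
--     alturas_maximas = [min(esquerda[i], direita[i]) for i in range(total_muros)]
--     return max(alturas_maximas)
-- ===== SOURCE B (Python) =====
-- def parte_1(muros):
--     # Closed form per position: the height at i is capped by the distance to each
--     # end (i+1 and n-i, the forced boundary ramps) and by muros[j] + |i - j| for
--     # every constraining wall j; take the best position.  No DP arrays at all.
--     n = len(muros)
--     melhor = None
--     for i in range(n):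
--         esq = i + 1
--         for j in range(1, i + 1):
--             esq = min(esq, muros[j] + (i - j))
--         dire = n - i
--         for j in range(i, n - 1):
--             dire = min(dire, muros[j] + (j - i))
--         h = min(esq, dire)
--         if melhor is None or h > melhor:
--             melhor = h
--     return 0 if melhor is None else melhor
-- ===== Notes on version B (the rewrite author's own statement) =====
-- stated objective: alternative
-- what changed: Replaces the two DP ramp arrays and the final max-of-mins list by a closed form evaluated per position: the height at i is the min of the distance caps i+1 and n-i and of muros[j] plus the distance to each constraining wall j, scanned directly with no stored tables.
import Mathlib
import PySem

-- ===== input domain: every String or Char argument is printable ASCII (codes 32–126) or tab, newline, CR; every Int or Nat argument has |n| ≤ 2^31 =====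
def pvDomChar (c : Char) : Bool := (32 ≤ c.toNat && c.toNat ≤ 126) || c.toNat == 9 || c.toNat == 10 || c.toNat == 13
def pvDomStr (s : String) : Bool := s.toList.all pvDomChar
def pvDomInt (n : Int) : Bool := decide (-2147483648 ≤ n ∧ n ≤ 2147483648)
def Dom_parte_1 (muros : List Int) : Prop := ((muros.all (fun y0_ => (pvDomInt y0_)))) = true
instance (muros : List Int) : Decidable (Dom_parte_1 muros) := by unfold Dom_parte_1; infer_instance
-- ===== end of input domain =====

-- B replaces A's two DP ramp arrays and final max-of-mins list by a per-position closed form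
-- (distance caps and per-wall distance constraints scanned directly); objective: alternative.

-- ===== PORT A =====
-- esquerda[i] = min(muros[i], esquerda[i-1]+1), built left to right from the previous value
def pvBuildEsq (prev : Int) : List Int → List Int
  | [] => []
  | m :: ms => min m (prev + 1) :: pvBuildEsq (min m (prev + 1)) ms

-- direita[i] = min(muros[i], direita[i+1]+1), built right to left; direita[last] = 1
def pvBuildDir : List Int → List Int
  | [] => []
  | [_] => [1]
  | m :: m2 :: ms =>
    let rest := pvBuildDir (m2 :: ms)
    min m (rest.headD 0 + 1) :: rest

def parte_1 (muros : List Int) : Int :=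
  if muros.length = 0 then 0
  else
    let esquerda := 1 :: pvBuildEsq 1 muros.tail
    let direita := pvBuildDir muros
    let alturas := List.zipWith min esquerda direita
    match alturas with
    | [] => 0
    | a :: rest => rest.foldl max a   -- max(alturas_maximas)

-- ===== PORT B =====
-- loop body of Source B's outer loop: the two direct scans for position i
-- (esq = cap i+1 lowered by walls left of i, dire = cap n-i lowered by walls
-- right of i), then the running best `melhor`
def pvMelhorStep (muros : List Int) (n : Int) (melhor : Option Int) (i : Int) : Option Int :=
  let esq := (PySem.List.pyRange 1 (i + 1) 1).foldl
    (fun h j => min h (PySem.List.pyGetD muros j 0 + (i - j))) (i + 1)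
  let dire := (PySem.List.pyRange i (n - 1) 1).foldl
    (fun h j => min h (PySem.List.pyGetD muros j 0 + (j - i))) (n - i)
  let h := min esq dire
  match melhor with
  | none => some h
  | some b => if h > b then some h else some b

def parte_1_alt (muros : List Int) : Int :=
  let n : Int := muros.length
  match (PySem.List.pyRange 0 n 1).foldl (pvMelhorStep muros n) none with
  | none => 0
  | some b => b

-- ===== PRECONDITION & SPEC =====
def Spec_parte_1 (muros : List Int) (out : Int) : Prop := out = parte_1_alt muros
instance (muros : List Int) (out : Int) : Decidable (Spec_parte_1 muros out) := by unfold Spec_parte_1; infer_instance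

-- ===== CLAIM (what is proved, stated in full; the proofs are below) =====
def Claim_equal_parte_1 : Prop := ∀ (muros : List Int), Dom_parte_1 muros → Spec_parte_1 muros (parte_1 muros)

-- ===== LEMMAS AND PROOFS =====

-- generic min-fold algebra over an index list
theorem pvMinFoldN_init (f : Nat → Int) (l : List Nat) : ∀ a b : Int,
    l.foldl (fun h j => min h (f j)) (min a b) = min a (l.foldl (fun h j => min h (f j)) b) := by
  induction l with
  | nil => intro a b; simp
  | cons x l ih => intro a b; simp only [List.foldl_cons, min_assoc]; exact ih a (min b (f x))

theorem pvMinFoldN_add_one (f : Nat → Int) (l : List Nat) : ∀ a : Int,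
    l.foldl (fun h j => min h (f j + 1)) (a + 1) = l.foldl (fun h j => min h (f j)) a + 1 := by
  induction l with
  | nil => intro a; simp
  | cons x l ih =>
    intro a
    simp only [List.foldl_cons]
    rw [show min (a + 1) (f x + 1) = min a (f x) + 1 by omega]
    exact ih (min a (f x))

-- foldl congruence: same lists, same inits, pointwise-equal steps
theorem pvFoldl_congr {β : Type} {f g : Int → β → Int} {a b : Int} {l₁ l₂ : List β}
    (hl : l₁ = l₂) (hab : a = b) (hfg : ∀ x j, f x j = g x j) :
    l₁.foldl f a = l₂.foldl g b := by
  subst hl; subst hab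
  rw [show f = g from funext fun x => funext fun j => hfg x j]

-- proof-side value functions for A's arrays
def pvE : Int → List Int → Nat → Int
  | _, [], _ => 0
  | p, m :: _, 0 => min m (p + 1)
  | p, m :: ms, t+1 => pvE (min m (p + 1)) ms t

def pvD : List Int → Nat → Int
  | [], _ => 0
  | m :: l, 0 => (match l with | [] => 1 | _ :: _ => min m (pvD l 0 + 1))
  | _ :: l, t+1 => pvD l t

def pvEsqF (muros : List Int) : Nat → Int
  | 0 => 1
  | t+1 => pvE 1 muros.tail t

def pvVal (muros : List Int) (t : Nat) : Int := min (pvEsqF muros t) (pvD muros t)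

-- A's arrays are the maps of pvE / pvD over the index range
theorem pvBuildEsq_eq_map : ∀ (l : List Int) (p : Int),
    pvBuildEsq p l = (List.range l.length).map (pvE p l) := by
  intro l
  induction l with
  | nil => intro p; simp [pvBuildEsq]
  | cons m ms ih =>
    intro p
    have hcomp : (pvE p (m :: ms)) ∘ Nat.succ = pvE (min m (p + 1)) ms := funext fun t => rfl
    rw [List.length_cons, List.range_succ_eq_map, List.map_cons, List.map_map, hcomp, ← ih]
    rfl

theorem pvBuildDir_eq_map : ∀ (l : List Int),
    pvBuildDir l = (List.range l.length).map (pvD l) := by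
  intro l
  induction l with
  | nil => simp [pvBuildDir]
  | cons m ms ih =>
    cases ms with
    | nil => simp [pvBuildDir, pvD]
    | cons m2 t =>
      have hcomp : (pvD (m :: m2 :: t)) ∘ Nat.succ = pvD (m2 :: t) := funext fun k => rfl
      rw [List.length_cons, List.range_succ_eq_map, List.map_cons, List.map_map, hcomp, ← ih]
      have hhead : (pvBuildDir (m2 :: t)).headD 0 = pvD (m2 :: t) 0 := by
        rw [ih, List.length_cons, List.range_succ_eq_map]; rfl
      show min m ((pvBuildDir (m2 :: t)).headD 0 + 1) :: pvBuildDir (m2 :: t) = _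
      rw [hhead]
      rfl

-- closed form: pvE p l t = min(p + t + 1, min over j ≤ t of l[j] + (t - j))
theorem pvE_formula : ∀ (l : List Int) (p : Int) (t : Nat), t < l.length →
    pvE p l t = (List.range (t + 1)).foldl
      (fun h j => min h (l.getD j 0 + ((t : Int) - (j : Int)))) (p + ((t : Int) + 1)) := by
  intro l
  induction l with
  | nil => intro p t h; simp at h
  | cons m ms ih =>
    intro p t ht
    cases t with
    | zero =>
      simp [pvE, List.range_succ, min_comm]
    | succ t =>
      have ht' : t < ms.length := by simpa using ht
      rw [show pvE p (m :: ms) (t + 1) = pvE (min m (p + 1)) ms t from rfl, ih _ t ht']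
      symm
      rw [show List.range (t + 1 + 1) = 0 :: List.map Nat.succ (List.range (t + 1)) from
        List.range_succ_eq_map]
      simp only [List.foldl_cons, List.foldl_map]
      apply pvFoldl_congr rfl
      · simp only [List.getD_cons_zero]
        push_cast
        omega
      · intro x j
        simp only [List.getD_cons_succ]
        congr 1
        push_cast
        ring

-- closed form: pvD l t = min(len - t, min over k < len - 1 - t of l[t+k] + k)
theorem pvD_formula : ∀ (l : List Int) (t : Nat), t < l.length →
    pvD l t = (List.range (l.length - 1 - t)).foldl
      (fun h k => min h (l.getD (t + k) 0 + (k : Int))) ((l.length : Int) - (t : Int)) := by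
  intro l
  induction l with
  | nil => intro t h; simp at h
  | cons m ms ih =>
    intro t ht
    cases t with
    | zero =>
      cases ms with
      | nil => simp [pvD]
      | cons m2 t' =>
        have hIH := ih 0 (by simp)
        rw [show pvD (m :: m2 :: t') 0 = min m (pvD (m2 :: t') 0 + 1) from rfl, hIH]
        rw [show (m :: m2 :: t').length - 1 - 0 = t'.length + 1 by simp]
        rw [List.range_succ_eq_map]
        simp only [List.foldl_cons, List.foldl_map]
        -- left side: rewrite the inner fold into canonical form over g k = (m2::t')[k] + k
        rw [show (List.foldl (fun h k => min h ((m2 :: t').getD (0 + k) 0 + (k : Int)))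
              (((m2 :: t').length : Int) - ((0 : Nat) : Int)) (List.range ((m2 :: t').length - 1 - 0)))
            = (List.foldl (fun h k => min h ((m2 :: t').getD k 0 + (k : Int)))
              ((t'.length : Int) + 1) (List.range t'.length)) from
          pvFoldl_congr (by simp)
            (by simp only [List.length_cons]; push_cast; ring)
            (by intro x k; rw [Nat.zero_add])]
        symm
        -- right side: step adds 1 to each constraint; init is min m (len+1+1)
        rw [show (fun (x : Int) (y : Nat) => min x ((m :: m2 :: t').getD (0 + y.succ) 0 + ((y.succ : Nat) : Int)))
            = (fun (x : Int) (y : Nat) => min x (((m2 :: t').getD y 0 + (y : Int)) + 1)) from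
          funext fun x => funext fun y => by
            rw [Nat.zero_add]
            simp only [List.getD_cons_succ]
            congr 1
            push_cast
            ring]
        rw [show (min (((m :: m2 :: t').length : Int) - ((0 : Nat) : Int)) ((m :: m2 :: t').getD (0 + 0) 0 + ((0 : Nat) : Int)))
            = min m (((t'.length : Int) + 1) + 1) from by
          simp only [List.length_cons, Nat.zero_add, List.getD_cons_zero]
          push_cast
          omega]
        rw [pvMinFoldN_init (fun k => (m2 :: t').getD k 0 + (k : Int) + 1) (List.range t'.length) m (((t'.length : Int) + 1) + 1)]
        rw [pvMinFoldN_add_one (fun k => (m2 :: t').getD k 0 + (k : Int)) (List.range t'.length) ((t'.length : Int) + 1)]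
    | succ t =>
      have ht' : t < ms.length := by simpa using ht
      rw [show pvD (m :: ms) (t + 1) = pvD ms t from rfl, ih t ht']
      apply pvFoldl_congr
      · rw [show (m :: ms).length - 1 - (t + 1) = ms.length - 1 - t from by
          simp only [List.length_cons]; omega]
      · simp only [List.length_cons]; push_cast; ring
      · intro x k
        rw [show t + 1 + k = (t + k) + 1 from by omega]
        simp only [List.getD_cons_succ]

-- B's per-position value equals pvVal
theorem pvBval_eq (muros : List Int) (t : Nat) (ht : t < muros.length) :
    min ((PySem.List.pyRange 1 ((t : Int) + 1) 1).foldl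
          (fun h j => min h (PySem.List.pyGetD muros j 0 + ((t : Int) - j))) ((t : Int) + 1))
        ((PySem.List.pyRange (t : Int) ((muros.length : Int) - 1) 1).foldl
          (fun h j => min h (PySem.List.pyGetD muros j 0 + (j - (t : Int)))) ((muros.length : Int) - (t : Int)))
      = pvVal muros t := by
  obtain ⟨m, rest, rfl⟩ : ∃ m rest, muros = m :: rest := by
    cases muros with
    | nil => simp at ht
    | cons a b => exact ⟨a, b, rfl⟩
  unfold pvVal
  congr 1
  · -- esquerda side
    cases t with
    | zero =>
      rw [PySem.List.pyRange_one_eq_nil (by norm_num)]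
      norm_num [pvEsqF]
    | succ s =>
      have hs : s < rest.length := by simpa using ht
      rw [show pvEsqF (m :: rest) (s + 1) = pvE 1 rest s from rfl, pvE_formula rest 1 s hs]
      rw [PySem.List.pyRange_one]
      rw [show ((((s + 1 : Nat) : Int) + 1) - 1).toNat = s + 1 by omega]
      rw [List.foldl_map]
      apply pvFoldl_congr rfl
      · push_cast; ring
      · intro x j
        rw [show (1 : Int) + (j : Int) = (((j + 1 : Nat)) : Int) by push_cast; ring,
          PySem.List.pyGetD_natCast]
        simp only [List.getD_cons_succ]
        congr 1
        push_cast
        ring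
  · -- direita side
    rw [pvD_formula (m :: rest) t ht]
    rw [PySem.List.pyRange_one]
    rw [show ((((m :: rest).length : Int) - 1) - (t : Int)).toNat = (m :: rest).length - 1 - t from by
      simp only [List.length_cons]; omega]
    rw [List.foldl_map]
    apply pvFoldl_congr rfl rfl
    intro x k
    rw [show (t : Int) + (k : Int) = (((t + k : Nat)) : Int) by push_cast; ring,
      PySem.List.pyGetD_natCast]
    congr 1
    push_cast
    ring

-- the option-accumulator running-max loop, abstractly over its two step equations
theorem pvOptFold_some {α : Type} (step : Option Int → α → Option Int) (g : α → Int)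
    (hsome : ∀ b i, step (some b) i = some (max b (g i))) :
    ∀ (l : List α) (b : Int), l.foldl step (some b) = some ((l.map g).foldl max b) := by
  intro l
  induction l with
  | nil => intro b; simp
  | cons x l ih =>
    intro b
    simp only [List.foldl_cons, List.map_cons, hsome]
    exact ih (max b (g x))

theorem pvOptFold_none {α : Type} (step : Option Int → α → Option Int) (g : α → Int)
    (hnone : ∀ i, step none i = some (g i))
    (hsome : ∀ b i, step (some b) i = some (max b (g i)))
    (x : α) (l : List α) :
    (x :: l).foldl step none = some ((l.map g).foldl max (g x)) := by
  simp only [List.foldl_cons, hnone]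
  exact pvOptFold_some step g hsome l (g x)

-- zipWith min of two maps over the same index list
theorem pvZipWith_min_map {α : Type} (f g : α → Int) (l : List α) :
    List.zipWith min (l.map f) (l.map g) = l.map (fun t => min (f t) (g t)) := by
  induction l with
  | nil => rfl
  | cons x l ih => simp [ih]

-- ===== VERDICT (by name: the statement is the Claim_ definition above) =====
theorem parte_1_spec : Claim_equal_parte_1 := by
  intro muros _
  unfold Spec_parte_1
  cases muros with
  | nil => rfl
  | cons m rest =>
    -- A's value: max over pvVal
    have hesq : (1 : Int) :: pvBuildEsq 1 rest
        = (List.range (rest.length + 1)).map (pvEsqF (m :: rest)) := by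
      rw [List.range_succ_eq_map, List.map_cons, List.map_map,
        show (pvEsqF (m :: rest)) ∘ Nat.succ = pvE 1 rest from funext fun t => rfl,
        ← pvBuildEsq_eq_map]
      rfl
    have hA : parte_1 (m :: rest)
        = ((List.range rest.length).map (fun t => pvVal (m :: rest) (t + 1))).foldl
            max (pvVal (m :: rest) 0) := by
      simp only [parte_1, List.length_cons, Nat.succ_ne_zero, if_false, List.tail_cons]
      rw [hesq, pvBuildDir_eq_map, List.length_cons,
        pvZipWith_min_map (pvEsqF (m :: rest)) (pvD (m :: rest)) (List.range (rest.length + 1))]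
      rw [List.range_succ_eq_map, List.map_cons, List.map_map]
      rfl
    rw [hA]
    -- B's value: the same max, position by position
    simp only [parte_1_alt]
    conv_rhs => rw [PySem.List.pyRange_one 0 (((m :: rest).length : Int)),
      show ((((m :: rest).length : Int)) - 0).toNat = rest.length + 1 from by
        simp only [List.length_cons]; omega,
      List.foldl_map,
      show List.range (rest.length + 1) = 0 :: List.map Nat.succ (List.range rest.length) from
        List.range_succ_eq_map]
    rw [pvOptFold_none
      (fun acc (k : Nat) => pvMelhorStep (m :: rest) (((m :: rest).length : Int)) acc ((0 : Int) + (k : Int)))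
      (fun k : Nat =>
        min ((PySem.List.pyRange 1 (((0 : Int) + (k : Int)) + 1) 1).foldl
              (fun h j => min h (PySem.List.pyGetD (m :: rest) j 0 + (((0 : Int) + (k : Int)) - j))) (((0 : Int) + (k : Int)) + 1))
            ((PySem.List.pyRange ((0 : Int) + (k : Int)) ((((m :: rest).length : Int)) - 1) 1).foldl
              (fun h j => min h (PySem.List.pyGetD (m :: rest) j 0 + (j - ((0 : Int) + (k : Int))))) ((((m :: rest).length : Int)) - ((0 : Int) + (k : Int)))))
      (fun i => rfl)
      (by
        intro b i
        show (if _ > b then _ else _) = _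
        split_ifs with h
        · rw [max_eq_right h.le]
        · rw [max_eq_left (not_lt.mp h)])]
    -- reduce the outer match on `some …` and compare the two max-folds pointwise
    show _ = ((List.map Nat.succ (List.range rest.length)).map _).foldl max _
    rw [List.map_map]
    have hval : ∀ t : Nat, t < (m :: rest).length →
        min ((PySem.List.pyRange 1 (((0 : Int) + (t : Int)) + 1) 1).foldl
              (fun h j => min h (PySem.List.pyGetD (m :: rest) j 0 + (((0 : Int) + (t : Int)) - j))) (((0 : Int) + (t : Int)) + 1))
            ((PySem.List.pyRange ((0 : Int) + (t : Int)) ((((m :: rest).length : Int)) - 1) 1).foldl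
              (fun h j => min h (PySem.List.pyGetD (m :: rest) j 0 + (j - ((0 : Int) + (t : Int))))) ((((m :: rest).length : Int)) - ((0 : Int) + (t : Int))))
          = pvVal (m :: rest) t := by
      intro t htl
      have := pvBval_eq (m :: rest) t htl
      simpa using this
    congr 1
    · exact (hval 0 (by simp)).symm
    · apply List.map_congr_left
      intro t htm
      have htl : t + 1 < (m :: rest).length := by
        simp only [List.length_cons]
        exact Nat.succ_lt_succ (List.mem_range.mp htm)
      exact (hval (t + 1) htl).symm
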